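-- pv_equiv track=rewrite | github.com/darker0n/ale | core/parser.py | word_space
-- ===== SOURCE A (Python) =====
-- def word_space(path):
--     path = path.split(" ")
--     new_path = ""
--     i = 0
--     for x in path:
--         if len(path) - i == 1:
--             new_path += x
--         else:
--             new_path += x + "\\ "
--             i += 1
--     return new_path
-- ===== SOURCE B (Python) =====
-- def word_space(path):
--     return path.replace(" ", "\\ ")
-- ===== Notes on version B (the rewrite author's own statement) =====
-- stated objective: idiomatic
-- what changed: Replaced the split-on-space loop with an index counter and string accumulator by a single str.replace call that turns each space into backslash-space.
import Mathlib
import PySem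

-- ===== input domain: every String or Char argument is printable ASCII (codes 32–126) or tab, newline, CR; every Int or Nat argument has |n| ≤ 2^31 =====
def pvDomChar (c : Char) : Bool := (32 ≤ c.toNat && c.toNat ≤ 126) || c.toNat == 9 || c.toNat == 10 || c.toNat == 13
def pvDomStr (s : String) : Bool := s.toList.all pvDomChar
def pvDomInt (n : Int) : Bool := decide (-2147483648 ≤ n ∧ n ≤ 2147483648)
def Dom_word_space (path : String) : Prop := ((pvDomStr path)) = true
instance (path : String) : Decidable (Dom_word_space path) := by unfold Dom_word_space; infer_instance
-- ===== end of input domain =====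

-- B replaces A's split-on-space loop with an index counter by a single str.replace call (idiomatic; same O(n) cost).

-- ===== PORT A =====
-- path.split(" ") with the non-empty separator " " always succeeds, so split? is always some; getD [] is its value.
def word_space (path : String) : String :=
  let parts := (PySem.Str.split? path " ").getD []
  (parts.foldl
    (fun (st : String × Nat) x =>
      if parts.length - st.2 = 1 then (st.1 ++ x, st.2)
      else (st.1 ++ x ++ "\\ ", st.2 + 1))
    ("", 0)).1

-- ===== PORT B =====
def word_space_alt (path : String) : String := PySem.Str.replace path " " "\\ "

-- ===== PRECONDITION & SPEC =====
def Spec_word_space (path : String) (out : String) : Prop := out = word_space_alt path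
instance (path : String) (out : String) : Decidable (Spec_word_space path out) := by unfold Spec_word_space; infer_instance

-- ===== CLAIM (what is proved, stated in full; the proofs are below) =====
def Claim_equal_word_space : Prop := ∀ (path : String), Dom_word_space path → Spec_word_space path (word_space path)

-- ===== LEMMAS AND PROOFS =====

def specRep : List Char → List Char
  | [] => []
  | c :: t => if c = ' ' then '\\' :: ' ' :: specRep t else c :: specRep t

lemma replace_go_space :
    ∀ (l : List Char) (fuel : Nat) (acc : List Char), l.length ≤ fuel →
      PySem.Chars.replace.go [' '] ['\\', ' '] fuel l acc
        = acc.reverse ++ specRep l := by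
  intro l
  induction l with
  | nil =>
    intro fuel acc _
    cases fuel <;> simp [PySem.Chars.replace.go, specRep]
  | cons c t ih =>
    intro fuel acc h
    cases fuel with
    | zero => simp at h
    | succ fuel =>
      by_cases hc : c = ' '
      · subst hc
        have hp : List.isPrefixOf [' '] (' ' :: t) = true := by
          simp [List.isPrefixOf]
        rw [PySem.Chars.replace.go]
        simp only [hp, if_pos, List.length_cons, List.drop_succ_cons, List.length_nil, List.drop_zero]
        rw [ih fuel _ (by simpa using Nat.lt_succ_iff.mp (by simpa using h))]
        simp [specRep]
      · have hp : List.isPrefixOf [' '] (c :: t) = false := by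
          simp [List.isPrefixOf]; exact fun h' => hc h'.symm
        rw [PySem.Chars.replace.go]
        simp only [hp]
        rw [ih fuel _ (by simpa using Nat.lt_succ_iff.mp (by simpa using h))]
        simp [specRep, hc]

lemma replace_eq_specRep (l : List Char) :
    PySem.Chars.replace l [' '] ['\\', ' '] = specRep l := by
  rw [PySem.Chars.replace]
  simp only [List.isEmpty_cons, Bool.false_eq_true, if_false]
  exact (replace_go_space l l.length [] le_rfl).trans (by simp)

def splitSpec : List Char → List (List Char)
  | [] => [[]]
  | c :: t => if c = ' ' then [] :: splitSpec t
              else ((c :: (splitSpec t).headI) :: (splitSpec t).tail)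

lemma splitSpec_ne_nil (l : List Char) : splitSpec l ≠ [] := by
  cases l with
  | nil => simp [splitSpec]
  | cons c t => simp only [splitSpec]; split <;> simp

lemma splitSpec_cons_tail (l : List Char) :
    (splitSpec l).headI :: (splitSpec l).tail = splitSpec l := by
  cases h : splitSpec l with
  | nil => exact absurd h (splitSpec_ne_nil l)
  | cons a b => simp

lemma split_go_space :
    ∀ (l : List Char) (fuel : Nat) (cur : List Char) (acc : List (List Char)),
      l.length < fuel →
      PySem.Chars.splitOn.go [' '] fuel l cur acc
        = acc.reverse ++ ((cur.reverse ++ (splitSpec l).headI) :: (splitSpec l).tail) := by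
  intro l
  induction l with
  | nil =>
    intro fuel cur acc h
    cases fuel with
    | zero => omega
    | succ fuel => simp [PySem.Chars.splitOn.go, splitSpec]
  | cons c t ih =>
    intro fuel cur acc h
    cases fuel with
    | zero => omega
    | succ fuel =>
      by_cases hc : c = ' '
      · subst hc
        have hp : List.isPrefixOf [' '] (' ' :: t) = true := by
          simp [List.isPrefixOf]
        rw [PySem.Chars.splitOn.go]
        simp only [hp, if_pos, List.length_cons, List.drop_succ_cons, List.length_nil, List.drop_zero]
        rw [ih fuel _ _ (by simp at h ⊢; omega)]
        simp [splitSpec, splitSpec_cons_tail]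
      · have hp : List.isPrefixOf [' '] (c :: t) = false := by
          simp [List.isPrefixOf]; exact fun h' => hc h'.symm
        rw [PySem.Chars.splitOn.go]
        simp only [hp, Bool.false_eq_true, if_false]
        rw [ih fuel _ _ (by simp at h ⊢; omega)]
        simp [splitSpec, hc]

lemma split_eq_splitSpec (l : List Char) :
    PySem.Chars.splitOn l [' '] = splitSpec l := by
  rw [PySem.Chars.splitOn]
  rw [split_go_space l (l.length + 1) [] [] (by omega)]
  simpa using splitSpec_cons_tail l

def interS : List String → String
  | [] => ""
  | [x] => x
  | x :: y :: xs => x ++ "\\ " ++ interS (y :: xs)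

lemma interS_cons_cons (c : Char) (x : List Char) (xs : List String) :
    (interS (String.ofList (c :: x) :: xs)).toList
      = c :: (interS (String.ofList x :: xs)).toList := by
  cases xs with
  | nil => simp [interS]
  | cons y ys => simp [interS]

lemma interS_splitSpec (l : List Char) :
    (interS ((splitSpec l).map String.ofList)).toList = specRep l := by
  induction l with
  | nil => simp [splitSpec, interS, specRep]
  | cons c t ih =>
    by_cases hc : c = ' '
    · subst hc
      simp only [splitSpec, if_pos, List.map_cons]
      cases h : splitSpec t with
      | nil => exact absurd h (splitSpec_ne_nil t)
      | cons a b =>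
        rw [h] at ih
        simp only [List.map_cons] at ih ⊢
        simp [interS, specRep, ← ih]
    · simp only [splitSpec, hc, if_false, List.map_cons]
      cases h : splitSpec t with
      | nil => exact absurd h (splitSpec_ne_nil t)
      | cons a b =>
        rw [h] at ih
        simp only [List.headI, List.tail_cons, List.map_cons] at ih ⊢
        rw [interS_cons_cons]
        simp [specRep, hc, ih]

lemma fold_eq_interS :
    ∀ (ys : List String) (acc : String) (i n : Nat), i + ys.length = n →
      (ys.foldl
        (fun (st : String × Nat) x =>
          if n - st.2 = 1 then (st.1 ++ x, st.2)
          else (st.1 ++ x ++ "\\ ", st.2 + 1))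
        (acc, i)).1 = acc ++ interS ys := by
  intro ys
  induction ys with
  | nil => intro acc i n _; simp [interS]
  | cons x t ih =>
    intro acc i n hn
    cases t with
    | nil =>
      have : n - i = 1 := by simp at hn; omega
      simp [interS, this]
    | cons y ys' =>
      have hne : ¬ (n - i = 1) := by simp at hn; omega
      rw [List.foldl_cons, if_neg hne]
      rw [ih (acc ++ x ++ "\\ ") (i + 1) n (by simp at hn ⊢; omega)]
      simp [interS, String.append_assoc]


-- ===== VERDICT (by name: the statement is the Claim_ definition above) =====
theorem word_space_spec : Claim_equal_word_space := by
  intro path _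
  unfold Spec_word_space
  have hsplit : (PySem.Str.split? path " ").getD []
      = (splitSpec path.toList).map String.ofList := by
    have : (" " : String).toList = [' '] := rfl
    simp [PySem.Str.split?, PySem.Chars.split?, this, split_eq_splitSpec]
  have halt : word_space_alt path = String.ofList (specRep path.toList) := by
    have h1 : (" " : String).toList = [' '] := rfl
    have h2 : ("\\ " : String).toList = ['\\', ' '] := rfl
    simp [word_space_alt, PySem.Str.replace, h1, h2, replace_eq_specRep]
  rw [halt]
  unfold word_space
  rw [hsplit]
  rw [fold_eq_interS _ "" 0 _ (by simp)]
  rw [← interS_splitSpec path.toList]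
  simp
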